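-- pv_equiv track=rewrite | github.com/TurkuNLP/turkunlp.github.io | assets/images/gen_hexagon.py | organize_images_into_rows
-- ===== SOURCE A (Python) =====
-- from typing import List, Tuple, Optional
--
-- def organize_images_into_rows(image_paths: List[str], num_columns: int) -> List[List[str]]:
--     """
--     Organize image paths into rows with alternating sizes.
--     Even rows (0,2,4...) have num_columns images.
--     Odd rows (1,3,5...) have num_columns-1 images.
--
--     Args:
--         image_paths: List of paths to input images
--         num_columns: Number of columns for even rows
--
--     Returns:
--         List of lists, where each inner list contains image paths for one row
--     """
--     rows = []
--     i = 0
--     row_idx = 0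
--
--     while i < len(image_paths):
--         if row_idx % 2 == 0:
--             # Even rows: num_columns images
--             row_size = num_columns
--         else:
--             # Odd rows: num_columns-1 images
--             row_size = num_columns - 1
--
--         row = image_paths[i:i + row_size]
--         rows.append(row)
--         i += row_size
--         row_idx += 1
--
--     return rows
-- ===== SOURCE B (Python) =====
-- from typing import List
--
-- def organize_images_into_rows(image_paths: List[str], num_columns: int) -> List[List[str]]:
--     # Closed-form: one full period of 2*num_columns-1 images yields two rows
--     # (sizes c and c-1).  Compute the whole row-size list arithmetically with
--     # divmod, then cut the input once according to it.
--     n = len(image_paths)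
--     c = num_columns
--     period = 2 * c - 1
--     q, r = divmod(n, period)
--     sizes = [c, c - 1] * q
--     if r != 0:
--         sizes.append(min(r, c))
--         if r > c:
--             sizes.append(r - c)
--     # a trailing size-0 row never materialises (it only arises when c == 1
--     # and the count divides exactly: the loop would already have stopped)
--     if sizes and sizes[-1] == 0:
--         sizes.pop()
--     rows = []
--     pos = 0
--     for s in sizes:
--         rows.append(image_paths[pos:pos + s])
--         pos += s
--     return rows
-- ===== Notes on version B (the rewrite author's own statement) =====
-- stated objective: alternative
-- what changed: B replaces A's single element-walking loop with closed-form arithmetic: divmod by the period 2*num_columns-1 yields the complete row-size list ([c,c-1] repeated q times plus remainder rows, trimming a size-0 tail), which is then applied to the input in one slicing pass.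
import Mathlib
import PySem

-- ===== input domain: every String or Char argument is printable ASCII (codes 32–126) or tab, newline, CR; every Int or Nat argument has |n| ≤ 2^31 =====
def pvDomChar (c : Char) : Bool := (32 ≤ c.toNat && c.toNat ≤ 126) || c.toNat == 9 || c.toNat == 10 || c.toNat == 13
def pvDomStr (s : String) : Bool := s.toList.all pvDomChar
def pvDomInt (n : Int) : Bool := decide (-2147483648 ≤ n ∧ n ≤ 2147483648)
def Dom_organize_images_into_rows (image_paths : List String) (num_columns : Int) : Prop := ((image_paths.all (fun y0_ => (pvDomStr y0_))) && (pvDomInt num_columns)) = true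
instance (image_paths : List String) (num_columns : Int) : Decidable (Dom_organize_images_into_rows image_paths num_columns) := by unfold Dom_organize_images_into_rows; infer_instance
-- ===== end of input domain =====

-- B computes the row-size list in closed form (divmod by the period 2c-1) instead of
-- walking the list; return values proved equal on Pre_ (where A's loop terminates).

-- ===== PORT A =====
-- A's while loop, fuel-bounded; fuel 2*len+2 suffices whenever the Python loop
-- terminates (each pair of iterations consumes at least one element when c ≥ 1).
def pvALoop (xs : List String) (c : Int) : Nat → Int → Int → List (List String)
  | 0, _, _ => []
  | fuel + 1, i, row_idx =>
    if i < (xs.length : Int) then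
      let row_size := if PySem.Int.mod row_idx 2 == 0 then c else c - 1
      PySem.List.slice xs (some i) (some (i + row_size)) ::
        pvALoop xs c fuel (i + row_size) (row_idx + 1)
    else []

def organize_images_into_rows (image_paths : List String) (num_columns : Int) : List (List String) :=
  pvALoop image_paths num_columns (2 * image_paths.length + 2) 0 0

-- ===== PORT B =====
-- 'if sizes and sizes[-1] == 0: sizes.pop()'
def pvPop0 (l : List Int) : List Int :=
  if l.getLast? = some 0 then l.dropLast else l

-- sizes before the pop: q, r = divmod(n, 2c-1); [c, c-1]*q, then the remainder rows
def pvBase (n c : Int) : List Int :=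
  (List.replicate (PySem.Int.floordiv n (2 * c - 1)).toNat [c, c - 1]).flatten
    ++ (if PySem.Int.mod n (2 * c - 1) ≠ 0 then
          [min (PySem.Int.mod n (2 * c - 1)) c]
            ++ (if PySem.Int.mod n (2 * c - 1) > c then [PySem.Int.mod n (2 * c - 1) - c] else [])
        else [])

-- B's closed-form row-size list
def pvSizes (n c : Int) : List Int := pvPop0 (pvBase n c)

-- B's slicing pass: rows.append(image_paths[pos:pos+s]); pos += s
def pvChunk (xs : List String) : List Int → Int → List (List String)
  | [], _ => []
  | s :: rest, pos =>
    PySem.List.slice xs (some pos) (some (pos + s)) :: pvChunk xs rest (pos + s)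

def organize_images_into_rows_alt (image_paths : List String) (num_columns : Int) : List (List String) :=
  pvChunk image_paths (pvSizes (image_paths.length : Int) num_columns) 0

-- ===== PRECONDITION & SPEC =====
-- A's while loop never terminates when num_columns ≤ 0 and the list is nonempty
-- (i never increases); Pre_ excludes exactly those inputs, on which A returns nothing.
def Pre_organize_images_into_rows (image_paths : List String) (num_columns : Int) : Prop :=
  image_paths = [] ∨ 1 ≤ num_columns
instance (image_paths : List String) (num_columns : Int) : Decidable (Pre_organize_images_into_rows image_paths num_columns) := by unfold Pre_organize_images_into_rows; infer_instance

def pvWitness_organize_images_into_rows : List String × Int := (["a", "b", "c", "d"], 2)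

def Spec_organize_images_into_rows (image_paths : List String) (num_columns : Int) (out : List (List String)) : Prop := out = organize_images_into_rows_alt image_paths num_columns
instance (image_paths : List String) (num_columns : Int) (out : List (List String)) : Decidable (Spec_organize_images_into_rows image_paths num_columns out) := by unfold Spec_organize_images_into_rows; infer_instance

-- ===== CLAIM (what is proved, stated in full; the proofs are below) =====
def Claim_equal_organize_images_into_rows : Prop := ∀ (image_paths : List String) (num_columns : Int), Dom_organize_images_into_rows image_paths num_columns → Pre_organize_images_into_rows image_paths num_columns → Spec_organize_images_into_rows image_paths num_columns (organize_images_into_rows image_paths num_columns)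

-- ===== LEMMAS AND PROOFS =====

theorem pvPop0_append (l₁ l₂ : List Int) (h : l₂ ≠ []) :
    pvPop0 (l₁ ++ l₂) = l₁ ++ pvPop0 l₂ := by
  rcases List.eq_nil_or_concat l₂ with rfl | ⟨t, a, rfl⟩
  · exact absurd rfl h
  · unfold pvPop0
    simp only [List.concat_eq_append, ← List.append_assoc]
    rw [List.getLast?_concat, List.getLast?_concat, List.dropLast_concat, List.dropLast_concat]
    split_ifs <;> simp

-- A slice whose upper bound reaches past the end is just a drop.
theorem pvSlice_full (xs : List String) (i b : Int) (hi : 0 ≤ i) (hb : i ≤ b)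
    (hn : (xs.length : Int) ≤ b) :
    PySem.List.slice xs (some i) (some b) = xs.drop i.toNat := by
  rw [PySem.List.slice_toNat xs hi (le_trans hi hb)]
  exact List.take_of_length_le (by simp; omega)

theorem pvALoop_stop (xs : List String) (c : Int) (fuel : Nat) (i k : Int)
    (h : ¬ i < (xs.length : Int)) : pvALoop xs c fuel i k = [] := by
  cases fuel with
  | zero => rfl
  | succ f => simp [pvALoop, h]

-- arithmetic characterizations of pvBase / pvSizes (period p := 2c-1)
theorem pvSizes_zero (c : Int) : pvSizes 0 c = [] := by
  have hp : (2 * c - 1 : Int) ≠ 0 := by omega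
  have hr : PySem.Int.mod 0 (2 * c - 1) = 0 :=
    (PySem.Int.mod_eq_zero_iff_dvd 0 (2 * c - 1)).mpr (dvd_zero _)
  have hq : PySem.Int.floordiv 0 (2 * c - 1) = 0 := by
    have h := PySem.Int.floordiv_mul_add_mod 0 (2 * c - 1)
    rw [hr] at h
    have := mul_eq_zero.mp (by omega : PySem.Int.floordiv 0 (2 * c - 1) * (2 * c - 1) = 0)
    omega
  unfold pvSizes pvBase pvPop0
  rw [hq, hr]
  simp

theorem pvSizes_small (m c : Int) (hc : 1 ≤ c) (h0 : 0 < m) (h1 : m ≤ c) :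
    pvSizes m c = [m] := by
  have hp : (0:Int) < 2 * c - 1 := by omega
  rcases (by omega : m < 2 * c - 1 ∨ (c = 1 ∧ m = 1)) with hlt | ⟨hc1, hm1⟩
  · unfold pvSizes pvBase pvPop0
    rw [PySem.Int.floordiv_eq_ediv_of_pos hp, PySem.Int.mod_eq_emod_of_pos hp,
      Int.ediv_eq_zero_of_lt (by omega) hlt, Int.emod_eq_of_lt (by omega) hlt]
    simp [h0.ne', min_eq_left h1, not_lt.mpr h1]
  · subst hc1; subst hm1; decide

theorem pvSizes_mid (m c : Int) (hc : 1 ≤ c) (h0 : c < m) (h1 : m ≤ 2 * c - 1) :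
    pvSizes m c = [c, m - c] := by
  have hp : (0:Int) < 2 * c - 1 := by omega
  have hc2 : (2:Int) ≤ c := by omega
  rcases (by omega : m < 2 * c - 1 ∨ m = 2 * c - 1) with hlt | hm
  · unfold pvSizes pvBase pvPop0
    rw [PySem.Int.floordiv_eq_ediv_of_pos hp, PySem.Int.mod_eq_emod_of_pos hp,
      Int.ediv_eq_zero_of_lt (by omega) hlt, Int.emod_eq_of_lt (by omega) hlt]
    simp only [min_eq_right h0.le, h0, if_true]
    rw [if_pos (show m ≠ 0 from by omega),
      (show (List.replicate (Int.toNat (0:Int)) [c, c - 1]).flatten ++ ([c] ++ [m - c])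
        = [c, m - c] from rfl),
      (show [c, m - c].getLast? = some (m - c) from rfl),
      if_neg (show ¬ (some (m - c) = some (0:Int)) from by simp; omega)]
  · subst hm
    unfold pvSizes pvBase pvPop0
    rw [PySem.Int.floordiv_eq_ediv_of_pos hp, PySem.Int.mod_eq_emod_of_pos hp,
      Int.ediv_self (show (2 * c - 1 : Int) ≠ 0 from by omega), Int.emod_self,
      (show (2 * c - 1 : Int) - c = c - 1 from by ring)]
    simp [(show ¬ (c - 1 : Int) = 0 from by omega)]

theorem pvBase_ne_nil (m c : Int) (hc : 1 ≤ c) (h0 : 0 < m) : pvBase m c ≠ [] := by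
  have hp : (0:Int) < 2 * c - 1 := by omega
  unfold pvBase
  rw [PySem.Int.floordiv_eq_ediv_of_pos hp, PySem.Int.mod_eq_emod_of_pos hp]
  by_cases hr : m % (2 * c - 1) = 0
  · have hdvd : (2 * c - 1) ∣ m := Int.dvd_of_emod_eq_zero hr
    have hle : 2 * c - 1 ≤ m := Int.le_of_dvd h0 hdvd
    have hq : 1 ≤ m / (2 * c - 1) := by rw [Int.le_ediv_iff_mul_le hp]; omega
    obtain ⟨t, ht⟩ : ∃ t, (m / (2 * c - 1)).toNat = t + 1 := ⟨(m / (2 * c - 1)).toNat - 1, by omega⟩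
    rw [ht]
    simp [List.replicate_succ]
  · simp [hr]

theorem pvSizes_step (m c : Int) (hc : 1 ≤ c) (h : 2 * c - 1 < m) :
    pvSizes m c = c :: (c - 1) :: pvSizes (m - (2 * c - 1)) c := by
  have hp : (0:Int) < 2 * c - 1 := by omega
  have hbase : pvBase m c = [c, c - 1] ++ pvBase (m - (2 * c - 1)) c := by
    unfold pvBase
    simp only [PySem.Int.floordiv_eq_ediv_of_pos hp, PySem.Int.mod_eq_emod_of_pos hp]
    have hdiv : m / (2 * c - 1) = (m - (2 * c - 1)) / (2 * c - 1) + 1 := by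
      conv_lhs => rw [(show m = (m - (2 * c - 1)) + 1 * (2 * c - 1) from by ring)]
      rw [Int.add_mul_ediv_right _ _ (show (2 * c - 1 : Int) ≠ 0 from by omega)]
    have hmod : m % (2 * c - 1) = (m - (2 * c - 1)) % (2 * c - 1) :=
      (Int.sub_emod_right m (2 * c - 1)).symm
    have hq0 : 0 ≤ (m - (2 * c - 1)) / (2 * c - 1) := Int.ediv_nonneg (by omega) (by omega)
    rw [hdiv, hmod, (show ((m - (2 * c - 1)) / (2 * c - 1) + 1).toNat
      = ((m - (2 * c - 1)) / (2 * c - 1)).toNat + 1 from by omega), List.replicate_succ,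
      List.flatten_cons, List.append_assoc]
  unfold pvSizes
  rw [hbase, pvPop0_append _ _ (pvBase_ne_nil _ c hc (by omega))]
  rfl

-- Main invariant: from any even-row state i with enough fuel, A's loop equals
-- B's chunking of the closed-form sizes of the remaining n - i elements.
theorem pvMain (xs : List String) (c : Int) (hc : 1 ≤ c) :
    ∀ (fuel : Nat) (i k : Int), 0 ≤ i → i ≤ (xs.length : Int) →
      2 * ((xs.length : Int) - i).toNat + 1 ≤ fuel → PySem.Int.mod k 2 = 0 →
      pvALoop xs c fuel i k = pvChunk xs (pvSizes ((xs.length : Int) - i) c) i := by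
  intro fuel
  induction fuel using Nat.strong_induction_on with
  | _ fuel ih =>
    intro i k hi hin hfuel hk
    set n : Int := (xs.length : Int) with hn
    obtain ⟨f, rfl⟩ : ∃ f, fuel = f + 1 := ⟨fuel - 1, by omega⟩
    by_cases hlt : i < n
    · have hrs : (if (PySem.Int.mod k 2 == 0) = true then c else c - 1) = c := by
        rw [hk]; rfl
      have hrs2 : (if (PySem.Int.mod (k + 1) 2 == 0) = true then c else c - 1) = c - 1 := by
        have h1 : PySem.Int.mod (k + 1) 2 = 1 := by
          rw [PySem.Int.mod_eq_emod_of_pos (show (0:Int) < 2 from by omega)] at hk ⊢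
          omega
        rw [h1]; rfl
      set m : Int := n - i with hm
      rcases (by omega : m ≤ c ∨ c < m) with hsmall | hbig
      · -- one final even row
        rw [pvSizes_small m c hc (by omega) hsmall]
        simp only [pvALoop, hrs]
        rw [pvALoop_stop xs c f (i + c) (k + 1) (by omega)]
        simp only [pvChunk]
        rw [pvSlice_full xs i (i + c) hi (by omega) (by omega),
          pvSlice_full xs i (i + m) hi (by omega) (by omega),
          if_pos (show i < (xs.length : Int) from hlt)]
      · rcases (by omega : m ≤ 2 * c - 1 ∨ 2 * c - 1 < m) with hmid | hstep
        · -- even row + final odd row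
          rw [pvSizes_mid m c hc hbig hmid]
          obtain ⟨f', rfl⟩ : ∃ f', f = f' + 1 := ⟨f - 1, by omega⟩
          simp only [pvALoop, hrs, hrs2]
          rw [pvALoop_stop xs c f' (i + c + (c - 1)) (k + 1 + 1) (by omega)]
          simp only [pvChunk]
          rw [pvSlice_full xs (i + c) (i + c + (c - 1)) (by omega) (by omega) (by omega),
            pvSlice_full xs (i + c) (i + c + (m - c)) (by omega) (by omega) (by omega),
            if_pos (show i < (xs.length : Int) from hlt),
            if_pos (show i + c < (xs.length : Int) from by omega)]
        · -- full period, recurse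
          rw [pvSizes_step m c hc hstep]
          obtain ⟨f', rfl⟩ : ∃ f', f = f' + 1 := ⟨f - 1, by omega⟩
          simp only [pvALoop, hrs, hrs2]
          have hkk : PySem.Int.mod (k + 1 + 1) 2 = 0 := by
            have hk' : k % 2 = 0 := by
              rw [PySem.Int.mod_eq_emod_of_pos (show (0:Int) < 2 from by omega)] at hk; exact hk
            rw [PySem.Int.mod_eq_emod_of_pos (show (0:Int) < 2 from by omega)]; omega
          rw [ih f' (by omega) (i + c + (c - 1)) (k + 1 + 1) (by omega) (by omega)
            (by omega) hkk]
          simp only [pvChunk]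
          rw [(by omega : n - (i + c + (c - 1)) = m - (2 * c - 1)),
            if_pos (show i < (xs.length : Int) from hlt),
            if_pos (show i + c < (xs.length : Int) from by omega)]
    · rw [pvALoop_stop xs c (f + 1) i k hlt, (by omega : n - i = 0), pvSizes_zero c]
      rfl

theorem organize_images_into_rows_eq (image_paths : List String) (num_columns : Int)
    (hpre : Pre_organize_images_into_rows image_paths num_columns) :
    organize_images_into_rows image_paths num_columns =
      organize_images_into_rows_alt image_paths num_columns := by
  rcases hpre with hnil | hc
  · subst hnil
    unfold organize_images_into_rows organize_images_into_rows_alt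
    simp only [List.length_nil, Nat.cast_zero, pvSizes_zero num_columns]
    rfl
  · unfold organize_images_into_rows organize_images_into_rows_alt
    have := pvMain image_paths num_columns hc (2 * image_paths.length + 2) 0 0
      le_rfl (Int.natCast_nonneg _) (by omega) (by decide)
    simpa using this

-- ===== VERDICT (by name: the statement is the Claim_ definition above) =====
theorem organize_images_into_rows_spec : Claim_equal_organize_images_into_rows := by
  intro image_paths num_columns _ hpre
  exact organize_images_into_rows_eq image_paths num_columns hpre
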